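-- pv_equiv track=rewrite | github.com/LuthienResearch/luthien-proxy | src/luthien_proxy/policies/supply_chain_guard_utils.py | _split_on_chaining
-- ===== SOURCE A (Python) =====
-- def _split_on_chaining(tokens: list[str]) -> list[list[str]]:
--     """Split a token list on shell chaining operators (``&&``, ``||``, ``;``, ``|``)."""
--     segments: list[list[str]] = []
--     current: list[str] = []
--     for tok in tokens:
--         if tok in {"&&", "||", ";", "|"}:
--             if current:
--                 segments.append(current)
--                 current = []
--             continue
--         current.append(tok)
--     if current:
--         segments.append(current)
--     return segments
-- ===== SOURCE B (Python) =====
-- def _split_on_chaining(tokens: list[str]) -> list[list[str]]: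
--     """Split a token list on shell chaining operators (``&&``, ``||``, ``;``, ``|``).
--
--     Two-pointer run scanner: skip operator tokens, otherwise slice out the
--     maximal operator-free run starting at the current index.
--     """
--     ops = ("&&", "||", ";", "|")
--     segments: list[list[str]] = []
--     n = len(tokens)
--     i = 0
--     while i < n:
--         if tokens[i] in ops:
--             i += 1
--         else:
--             j = i + 1
--             while j < n and tokens[j] not in ops:
--                 j += 1
--             segments.append(tokens[i:j])
--             i = j
--     return segments
-- ===== Notes on version B (the rewrite author's own statement) =====
-- stated objective: alternative
-- what changed: Replaced the flush-on-operator accumulator loop with a two-pointer scanner that skips operator tokens and slices each maximal operator-free run out of the list directly.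
import Mathlib
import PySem

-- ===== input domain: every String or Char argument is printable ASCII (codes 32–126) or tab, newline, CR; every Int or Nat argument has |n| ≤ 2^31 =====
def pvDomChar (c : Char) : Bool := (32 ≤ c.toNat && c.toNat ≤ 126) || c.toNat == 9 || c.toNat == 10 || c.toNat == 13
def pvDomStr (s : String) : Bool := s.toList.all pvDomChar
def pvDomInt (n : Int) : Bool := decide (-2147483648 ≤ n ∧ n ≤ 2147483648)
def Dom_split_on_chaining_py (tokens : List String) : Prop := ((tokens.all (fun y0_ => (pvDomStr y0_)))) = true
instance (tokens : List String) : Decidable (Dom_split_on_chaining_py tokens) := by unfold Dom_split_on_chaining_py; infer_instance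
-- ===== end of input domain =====

-- B replaces A's flush-on-operator accumulator pass with a two-pointer scanner slicing maximal
-- operator-free runs; objective: alternative (same O(n) cost, different maintained state).

-- ===== PORT A =====
-- the set {"&&", "||", ";", "|"} (membership only)
def opsA : List String := ["&&", "||", ";", "|"]

-- one iteration of A's for-loop over state (segments, current)
def stepA (st : List (List String) × List String) (tok : String) : List (List String) × List String :=
  if tok ∈ opsA then
    (if st.2 ≠ [] then (st.1 ++ [st.2], ([] : List String)) else st)
  else (st.1, st.2 ++ [tok])

def split_on_chaining_py (tokens : List String) : List (List String) :=
  let st := tokens.foldl stepA ([], [])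
  if st.2 ≠ [] then st.1 ++ [st.2] else st.1

-- ===== PORT B =====
def isOpB (t : String) : Bool := t == "&&" || t == "||" || t == ";" || t == "|"

-- inner while loop: advance j past the operator-free run
def scanB (tokens : List String) (j : Nat) : Nat :=
  if j < tokens.length && !isOpB (tokens.getD j "") then scanB tokens (j + 1) else j
termination_by tokens.length - j
decreasing_by rename_i h; simp at h; omega

theorem scanB_ge (tokens : List String) (j : Nat) : j ≤ scanB tokens j := by
  unfold scanB
  split
  · rename_i h
    simp at h
    have := scanB_ge tokens (j + 1)
    omega
  · exact Nat.le_refl j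
termination_by tokens.length - j
decreasing_by rename_i h; simp at h; omega

-- outer while loop; tokens[i:j] ported as (drop i).take (j - i), exact for 0 ≤ i ≤ j
def goB (tokens : List String) (i : Nat) (segments : List (List String)) : List (List String) :=
  if i < tokens.length then
    if isOpB (tokens.getD i "") then goB tokens (i + 1) segments
    else
      let j := scanB tokens (i + 1)
      goB tokens j (segments ++ [(tokens.drop i).take (j - i)])
  else segments
termination_by tokens.length - i
decreasing_by
  · rename_i h _; omega
  · rename_i h _; have := scanB_ge tokens (i + 1); omega

def split_on_chaining_py_alt (tokens : List String) : List (List String) :=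
  goB tokens 0 []

-- ===== PRECONDITION & SPEC =====
def Spec_split_on_chaining_py (tokens : List String) (out : List (List String)) : Prop := out = split_on_chaining_py_alt tokens
instance (tokens : List String) (out : List (List String)) : Decidable (Spec_split_on_chaining_py tokens out) := by unfold Spec_split_on_chaining_py; infer_instance

-- ===== CLAIM (what is proved, stated in full; the proofs are below) =====
def Claim_equal_split_on_chaining_py : Prop := ∀ (tokens : List String), Dom_split_on_chaining_py tokens → Spec_split_on_chaining_py tokens (split_on_chaining_py tokens)

-- ===== LEMMAS AND PROOFS =====

-- reference recursion: the common segment structure both programs compute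
def refSeg : List String → List (List String)
  | [] => []
  | t :: ts =>
    if isOpB t then refSeg ts
    else (t :: ts.takeWhile (fun x => !isOpB x)) :: refSeg (ts.dropWhile (fun x => !isOpB x))
termination_by l => l.length
decreasing_by
  · simp
  · have := List.length_dropWhile_le (p := fun x => !isOpB x) (l := ts); simp; omega

theorem mem_opsA_iff (t : String) : t ∈ opsA ↔ isOpB t = true := by
  simp [opsA, isOpB]
  tauto

-- the finalizer of A
def finA (st : List (List String) × List String) : List (List String) :=
  if st.2 ≠ [] then st.1 ++ [st.2] else st.1

theorem finA_foldl_append (ts : List String) (segs : List (List String)) (cur : List String) :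
    finA (ts.foldl stepA (segs, cur)) = segs ++ finA (ts.foldl stepA ([], cur)) := by
  induction ts generalizing segs cur with
  | nil => simp [finA]; split <;> simp
  | cons t ts ih =>
    by_cases hop : t ∈ opsA
    · by_cases hc : cur = []
      · subst hc; simp [stepA, hop]; exact ih segs []
      · simp only [List.foldl_cons, stepA, hop, if_pos, hc, ne_eq, not_false_iff]
        rw [ih, ih ([] ++ [cur]) ([])]
        simp
    · simp only [List.foldl_cons, stepA, hop]
      exact ih segs (cur ++ [t])

theorem finA_run (ts : List String) (cur : List String) (hc : cur ≠ []) :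
    finA (ts.foldl stepA ([], cur)) =
      (cur ++ ts.takeWhile (fun x => !isOpB x)) ::
        finA ((ts.dropWhile (fun x => !isOpB x)).foldl stepA ([], [])) := by
  induction ts generalizing cur with
  | nil => simp [finA, hc]
  | cons t ts ih =>
    by_cases hop : isOpB t
    · have hmem : t ∈ opsA := (mem_opsA_iff t).mpr hop
      have hstep : stepA ([], cur) t = ([] ++ [cur], []) := by simp [stepA, hmem, hc]
      simp only [List.foldl_cons, hstep, List.takeWhile_cons, List.dropWhile_cons, hop,
        Bool.not_true]
      have hstep0 : stepA ([], []) t = ([], []) := by simp [stepA, hmem]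
      rw [finA_foldl_append]
      simp [hstep0]
    · have hmem : t ∉ opsA := fun h => hop ((mem_opsA_iff t).mp h)
      have hstep : stepA ([], cur) t = ([], cur ++ [t]) := by simp [stepA, hmem]
      simp only [List.foldl_cons, hstep, List.takeWhile_cons, List.dropWhile_cons, hop,
        Bool.not_false]
      rw [ih (cur ++ [t]) (by simp)]
      simp

theorem A_eq_refSeg (ts : List String) : split_on_chaining_py ts = refSeg ts := by
  rw [show split_on_chaining_py ts = finA (ts.foldl stepA ([], [])) from rfl]
  induction hn : ts.length using Nat.strong_induction_on generalizing ts with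
  | _ n ih =>
  match ts, hn with
  | [], _ => simp [finA, refSeg]
  | t :: ts, hn =>
    by_cases hop : isOpB t
    · have hmem : t ∈ opsA := (mem_opsA_iff t).mpr hop
      have hstep : stepA ([], []) t = ([], []) := by simp [stepA, hmem]
      simp only [List.foldl_cons, hstep]
      rw [refSeg, if_pos hop]
      exact ih ts.length (by simp [← hn]) ts rfl
    · have hmem : t ∉ opsA := fun h => hop ((mem_opsA_iff t).mp h)
      have hstep : stepA ([], []) t = ([], [] ++ [t]) := by simp [stepA, hmem]
      simp only [List.foldl_cons, hstep, List.nil_append]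
      rw [finA_run ts [t] (by simp), refSeg, if_neg (by simp [hop])]
      simp only [List.cons_append, List.nil_append]
      congr 1
      exact ih (ts.dropWhile (fun x => !isOpB x)).length
        (by have := List.length_dropWhile_le (p := fun x => !isOpB x) (l := ts); simp [← hn]; omega)
        _ rfl

theorem dropWhile_eq_drop_len_takeWhile {α : Type} (p : α → Bool) (l : List α) :
    l.dropWhile p = l.drop (l.takeWhile p).length := by
  induction l with
  | nil => simp
  | cons a l ih => by_cases h : p a <;> simp [h, ih]

theorem scanB_spec (tokens : List String) (j : Nat) :
    scanB tokens j = j + ((tokens.drop j).takeWhile (fun x => !isOpB x)).length := by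
  unfold scanB
  split
  · rename_i h
    simp only [Bool.and_eq_true, decide_eq_true_eq, Bool.not_eq_true'] at h
    obtain ⟨hj, hnot⟩ := h
    rw [scanB_spec tokens (j + 1)]
    have hd : tokens.drop j = tokens[j] :: tokens.drop (j + 1) := List.drop_eq_getElem_cons hj
    have hg : tokens.getD j "" = tokens[j] := by simp [List.getD_eq_getElem?_getD, List.getElem?_eq_getElem hj]
    rw [hg] at hnot
    rw [hd, List.takeWhile_cons]
    simp [hnot]
    omega
  · rename_i h
    simp only [Bool.and_eq_true, decide_eq_true_eq, Bool.not_eq_true', not_and_or] at h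
    rcases h with h | h
    · have : tokens.drop j = [] := List.drop_eq_nil_of_le (by omega)
      simp [this]
    · by_cases hj : j < tokens.length
      · have hd : tokens.drop j = tokens[j] :: tokens.drop (j + 1) := List.drop_eq_getElem_cons hj
        have hg : tokens.getD j "" = tokens[j] := by simp [List.getD_eq_getElem?_getD, List.getElem?_eq_getElem hj]
        rw [hg] at h
        rw [hd, List.takeWhile_cons]
        simp at h ⊢
        simp [h]
      · have : tokens.drop j = [] := List.drop_eq_nil_of_le (by omega)
        simp [this]
termination_by tokens.length - j
decreasing_by rename_i h; simp at h; omega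

theorem goB_eq (tokens : List String) (i : Nat) (segs : List (List String)) :
    goB tokens i segs = segs ++ refSeg (tokens.drop i) := by
  unfold goB
  split
  · rename_i hi
    have hd : tokens.drop i = tokens[i] :: tokens.drop (i + 1) := List.drop_eq_getElem_cons hi
    have hg : tokens.getD i "" = tokens[i] := by simp [List.getD_eq_getElem?_getD, List.getElem?_eq_getElem hi]
    split
    · rename_i hop
      rw [goB_eq tokens (i + 1) segs, hd, refSeg, if_pos (hg ▸ hop)]
    · rename_i hop
      rw [hg] at hop
      have hscan := scanB_spec tokens (i + 1)
      set L := ((tokens.drop (i + 1)).takeWhile (fun x => !isOpB x)).length with hL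
      have hslice : (tokens.drop i).take (scanB tokens (i + 1) - i) =
          tokens[i] :: (tokens.drop (i + 1)).takeWhile (fun x => !isOpB x) := by
        rw [hd, hscan]
        have he : i + 1 + L - i = L + 1 := by omega
        rw [he, List.take_succ_cons]
        congr 1
        exact (List.prefix_iff_eq_take.mp ((tokens.drop (i + 1)).takeWhile_prefix
          (p := fun x => !isOpB x))).symm
      have hdrop : tokens.drop (scanB tokens (i + 1)) =
          (tokens.drop (i + 1)).dropWhile (fun x => !isOpB x) := by
        rw [hscan, dropWhile_eq_drop_len_takeWhile, ← hL, List.drop_drop]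
      rw [goB_eq tokens (scanB tokens (i + 1)) _, hslice, hdrop, hd, refSeg, if_neg hop]
      simp
  · rename_i hi
    have : tokens.drop i = [] := List.drop_eq_nil_of_le (by omega)
    simp [this, refSeg]
termination_by tokens.length - i
decreasing_by
  all_goals rename_i h _
  all_goals have := scanB_ge tokens (i + 1)
  all_goals omega

-- ===== VERDICT (by name: the statement is the Claim_ definition above) =====
theorem split_on_chaining_py_spec : Claim_equal_split_on_chaining_py := by
  intro tokens _
  unfold Spec_split_on_chaining_py split_on_chaining_py_alt
  rw [goB_eq, A_eq_refSeg]
  simp
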